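-- pv_equiv track=rewrite | github.com/wefllagn/XGBoost-Model | src/features.py | make_future_calendar
-- ===== SOURCE A (Python) =====
-- from typing import Iterable, List, Tuple, Optional
--
-- def make_future_calendar(last_year: int, last_month: int, horizon: int) -> List[Tuple[int, int]]:
--     """Generate (year, month) pairs for 'horizon' months after the last known (year, month)."""
--     y, m = int(last_year), int(last_month)
--     fut: List[Tuple[int, int]] = []
--     for _ in range(horizon):
--         m += 1
--         if m > 12:
--             m = 1
--             y += 1
--         fut.append((y, m))
--     return fut
-- ===== SOURCE B (Python) =====
-- def make_future_calendar(last_year, last_month, horizon):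
--     """Generate (year, month) pairs for 'horizon' months after the last known (year, month)."""
--     y, m = int(last_year), int(last_month)
--     return [(y + (m - 1 + k) // 12, (m - 1 + k) % 12 + 1) for k in range(1, horizon + 1)]
-- ===== Notes on version B (the rewrite author's own statement) =====
-- stated objective: simpler
-- what changed: Replaces the stateful month/year carry loop with a one-line comprehension computing each pair from its absolute month index via floor divmod; Pre_ excludes positive-horizon calls whose last_month is negative or above 12 (not a calendar month), where A's stepwise carry emits accidental out-of-range pairs that modular arithmetic does not reproduce.
-- outside the precondition, e.g. on make_future_calendar(2020, 13, 2): A returns [(2021, 1), (2021, 2)], B returns [(2021, 2), (2021, 3)]; on make_future_calendar(2020, -3, 2): A returns [(2020, -2), (2020, -1)], B returns [(2019, 10), (2019, 11)]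
import Mathlib
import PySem

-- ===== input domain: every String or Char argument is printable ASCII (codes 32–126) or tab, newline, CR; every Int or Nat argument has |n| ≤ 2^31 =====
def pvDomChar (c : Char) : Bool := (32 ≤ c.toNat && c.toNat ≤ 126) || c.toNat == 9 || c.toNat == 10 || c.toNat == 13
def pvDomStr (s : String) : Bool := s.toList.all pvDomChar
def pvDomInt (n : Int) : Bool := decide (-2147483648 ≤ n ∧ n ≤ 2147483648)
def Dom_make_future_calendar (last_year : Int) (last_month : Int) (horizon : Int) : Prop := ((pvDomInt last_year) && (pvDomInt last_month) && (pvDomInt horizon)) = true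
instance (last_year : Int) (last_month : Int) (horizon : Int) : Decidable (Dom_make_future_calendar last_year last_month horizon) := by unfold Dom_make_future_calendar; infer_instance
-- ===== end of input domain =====

-- B replaces A's stateful month/year carry loop with a one-line comprehension computing
-- each pair from its absolute month index via floor divmod (objective: simpler).

-- ===== PORT A =====
-- A's loop: for _ in range(horizon): m += 1; if m > 12: m = 1; y += 1; fut.append((y, m))
def make_future_calendar (last_year : Int) (last_month : Int) (horizon : Int) : List (Int × Int) :=
  let st := (PySem.List.pyRange 0 horizon 1).foldl
    (fun (st : Int × Int × List (Int × Int)) (_ : Int) =>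
      let m := st.2.1 + 1
      if m > 12 then (st.1 + 1, 1, st.2.2 ++ [(st.1 + 1, 1)])
      else (st.1, m, st.2.2 ++ [(st.1, m)]))
    (last_year, last_month, [])
  st.2.2

-- ===== PORT B =====
-- B: [(y + (m-1+k)//12, (m-1+k)%12 + 1) for k in range(1, horizon + 1)]
def make_future_calendar_alt (last_year : Int) (last_month : Int) (horizon : Int) : List (Int × Int) :=
  (PySem.List.pyRange 1 (horizon + 1) 1).map (fun k =>
    (last_year + PySem.Int.floordiv (last_month - 1 + k) 12,
     PySem.Int.mod (last_month - 1 + k) 12 + 1))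

-- ===== PRECONDITION & SPEC =====
-- Pre_ excludes positive-horizon calls whose last_month is negative or above 12 (not a
-- calendar month): there A's stepwise carry emits accidental out-of-range pairs
-- (e.g. month -2, or a jump to January from month 13) that B does not reproduce.
def Pre_make_future_calendar (last_year : Int) (last_month : Int) (horizon : Int) : Prop :=
  horizon ≤ 0 ∨ (0 ≤ last_month ∧ last_month ≤ 12)
instance (last_year : Int) (last_month : Int) (horizon : Int) : Decidable (Pre_make_future_calendar last_year last_month horizon) := by unfold Pre_make_future_calendar; infer_instance

def pvWitness_make_future_calendar : Int × Int × Int := (2024, 6, 5)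

def Spec_make_future_calendar (last_year : Int) (last_month : Int) (horizon : Int) (out : List (Int × Int)) : Prop := out = make_future_calendar_alt last_year last_month horizon
instance (last_year : Int) (last_month : Int) (horizon : Int) (out : List (Int × Int)) : Decidable (Spec_make_future_calendar last_year last_month horizon out) := by unfold Spec_make_future_calendar; infer_instance

-- ===== CLAIM (what is proved, stated in full; the proofs are below) =====
def Claim_equal_make_future_calendar : Prop := ∀ (last_year : Int) (last_month : Int) (horizon : Int), Dom_make_future_calendar last_year last_month horizon → Pre_make_future_calendar last_year last_month horizon → Spec_make_future_calendar last_year last_month horizon (make_future_calendar last_year last_month horizon)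

-- ===== LEMMAS AND PROOFS =====

-- B's per-index cell, abbreviated for the loop invariant.
def pvCell (y m k : Int) : Int × Int :=
  (y + PySem.Int.floordiv (m - 1 + k) 12, PySem.Int.mod (m - 1 + k) 12 + 1)

-- one step of A's carry shifts B's cell index by one (month in range)
lemma pvCell_shift (y m k : Int) (hm : 0 ≤ m) (hm' : m ≤ 12) :
    (if m + 1 > 12 then pvCell (y + 1) 1 k else pvCell y (m + 1) k) = pvCell y m (k + 1) := by
  unfold pvCell
  simp only [PySem.Int.floordiv_eq_ediv_of_pos (by norm_num : (0:Int) < 12),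
    PySem.Int.mod_eq_emod_of_pos (by norm_num : (0:Int) < 12)]
  split_ifs <;> simp only [Prod.mk.injEq] <;> constructor <;> omega

-- the first pair A appends is B's cell at index 1 (month in range)
lemma pvCell_one (y m : Int) (hm : 0 ≤ m) (hm' : m ≤ 12) :
    (if m + 1 > 12 then ((y + 1, 1) : Int × Int) else (y, m + 1)) = pvCell y m 1 := by
  unfold pvCell
  simp only [PySem.Int.floordiv_eq_ediv_of_pos (by norm_num : (0:Int) < 12),
    PySem.Int.mod_eq_emod_of_pos (by norm_num : (0:Int) < 12)]
  split_ifs <;> simp only [Prod.mk.injEq] <;> constructor <;> omega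

-- loop invariant: A's fold over any index list emits exactly B's cells, appended to acc
lemma pvLoop (l : List Int) : ∀ (y m : Int) (acc : List (Int × Int)), 0 ≤ m → m ≤ 12 →
    (l.foldl
      (fun (st : Int × Int × List (Int × Int)) (_ : Int) =>
        let m' := st.2.1 + 1
        if m' > 12 then (st.1 + 1, 1, st.2.2 ++ [(st.1 + 1, 1)])
        else (st.1, m', st.2.2 ++ [(st.1, m')]))
      (y, m, acc)).2.2
    = acc ++ (List.range l.length).map (fun (j : Nat) => pvCell y m ((j : Int) + 1)) := by
  induction l with
  | nil => intro y m acc _ _; simp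
  | cons a t ih =>
    intro y m acc hm hm'
    simp only [List.foldl_cons, List.length_cons, List.range_succ_eq_map, List.map_cons,
      List.map_map]
    by_cases hc : m + 1 > 12
    · simp only [hc, if_true]
      rw [ih (y + 1) 1 (acc ++ [(y + 1, 1)]) (by norm_num) (by norm_num)]
      have hfirst := pvCell_one y m hm hm'
      simp only [hc, if_true] at hfirst
      rw [hfirst, List.append_assoc, List.singleton_append]
      congr 2
      apply List.map_congr_left
      intro j _
      simp only [Function.comp]
      have := pvCell_shift y m ((j : Int) + 1) hm hm'
      simp only [hc, if_true] at this
      push_cast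
      exact this
    · simp only [hc, if_false]
      rw [ih y (m + 1) (acc ++ [(y, m + 1)]) (by omega) (by omega)]
      have hfirst := pvCell_one y m hm hm'
      simp only [hc, if_false] at hfirst
      rw [hfirst, List.append_assoc, List.singleton_append]
      congr 2
      apply List.map_congr_left
      intro j _
      simp only [Function.comp]
      have := pvCell_shift y m ((j : Int) + 1) hm hm'
      simp only [hc, if_false] at this
      push_cast
      exact this

-- ===== VERDICT (by name: the statement is the Claim_ definition above) =====
theorem make_future_calendar_spec : Claim_equal_make_future_calendar := by
  intro y m h _ hpre
  unfold Spec_make_future_calendar make_future_calendar make_future_calendar_alt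
  rcases hpre with hh | ⟨hm, hm'⟩
  · rw [PySem.List.pyRange_one 0 h, PySem.List.pyRange_one 1 (h + 1)]
    have : h - 0 ≤ 0 := by omega
    have : (h - 0).toNat = 0 := Int.toNat_of_nonpos this
    rw [this]
    have : (h + 1 - 1).toNat = 0 := Int.toNat_of_nonpos (by omega)
    rw [this]
    simp
  · rw [pvLoop _ y m [] hm hm']
    rw [PySem.List.pyRange_one 0 h, PySem.List.pyRange_one 1 (h + 1)]
    simp only [List.length_map, List.length_range, List.map_map, List.nil_append]
    have he : h - 0 = h + 1 - 1 := by ring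
    rw [he]
    apply List.map_congr_left
    intro j _
    simp only [Function.comp]
    unfold pvCell
    have : m - 1 + (1 + (j : Int)) = m - 1 + ((j : Int) + 1) := by ring
    rw [this]
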